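-- pv_equiv track=rewrite | github.com/pengshd/MMDAdvanceTools | common/utils.py | find_sandwiching_frames
-- ===== SOURCE A (Python) =====
-- def find_sandwiching_frames(frames, current_frame):
--     frame_start, frame_end = None, None
--     for frame in reversed(frames):
--         if frame < current_frame:
--             frame_start = frame
--             break
--     for frame in frames:
--         if frame > current_frame:
--             frame_end = frame
--             break
--     if not frame_start or not frame_end:
--         return None
--     return [frame_start, frame_end]
-- ===== SOURCE B (Python) =====
-- def find_sandwiching_frames(frames, current_frame):
--     frame_start, frame_end = None, None
--     for frame in frames:
--         if frame < current_frame: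
--             frame_start = frame
--         elif frame > current_frame and frame_end is None:
--             frame_end = frame
--     if not frame_start or not frame_end:
--         return None
--     return [frame_start, frame_end]
-- ===== Notes on version B (the rewrite author's own statement) =====
-- stated objective: alternative
-- what changed: Replaces A's two opposite-direction scans (a reversed scan with break for the frame below, a forward scan with break for the frame above) by a single forward pass maintaining both candidates: the below-frame is overwritten on every match (so it ends as the last one, A's reversed-first-match) and the above-frame is set once; the guard is unchanged.
import Mathlib
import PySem

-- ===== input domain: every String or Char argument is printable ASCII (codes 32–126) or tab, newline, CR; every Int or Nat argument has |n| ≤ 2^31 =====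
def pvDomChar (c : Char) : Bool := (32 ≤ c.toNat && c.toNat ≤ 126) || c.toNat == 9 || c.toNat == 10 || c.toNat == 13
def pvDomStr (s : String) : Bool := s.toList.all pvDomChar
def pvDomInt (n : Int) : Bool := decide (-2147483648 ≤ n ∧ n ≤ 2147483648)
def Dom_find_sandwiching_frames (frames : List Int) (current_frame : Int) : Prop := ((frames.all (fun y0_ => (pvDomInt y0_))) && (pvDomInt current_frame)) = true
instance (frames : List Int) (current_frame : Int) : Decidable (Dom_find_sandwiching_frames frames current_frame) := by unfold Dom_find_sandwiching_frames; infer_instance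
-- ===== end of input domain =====

-- B replaces A's two opposite-direction break-scans by one forward pass keeping both candidates (alternative decomposition, same cost).

-- ===== PORT A =====
-- Python truthiness of an Optional[int]: falsy iff None or 0 (A's guard `if not frame_start or not frame_end`).
def pvFalsy (o : Option Int) : Bool :=
  match o with
  | none => true
  | some n => n == 0

-- first loop: `for frame in reversed(frames): if frame < current_frame: frame_start = frame; break`
-- (called on frames.reverse); second loop is the same scan with `frame > current_frame`.
def loopStartA (l : List Int) (c : Int) : Option Int :=
  match l with
  | [] => none
  | f :: rest => if f < c then some f else loopStartA rest c

def loopEndA (l : List Int) (c : Int) : Option Int :=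
  match l with
  | [] => none
  | f :: rest => if f > c then some f else loopEndA rest c

def find_sandwiching_frames (frames : List Int) (current_frame : Int) : Option (List Int) :=
  let frame_start := loopStartA frames.reverse current_frame
  let frame_end := loopEndA frames current_frame
  if pvFalsy frame_start || pvFalsy frame_end then none
  else
    match frame_start, frame_end with
    | some a, some b => some [a, b]
    | _, _ => none

-- ===== PORT B =====
-- single forward pass over frames carrying (frame_start, frame_end)
def loopB (l : List Int) (c : Int) (st : Option Int × Option Int) : Option Int × Option Int :=
  match l with
  | [] => st
  | f :: rest =>
      if f < c then loopB rest c (some f, st.2)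
      else if f > c && st.2.isNone then loopB rest c (st.1, some f)
      else loopB rest c st

-- B's own Python-truthiness test (falsy iff None or 0), kept separate from A's helper
def pvFalsyB (o : Option Int) : Bool := o.getD 0 == 0

def find_sandwiching_frames_alt (frames : List Int) (current_frame : Int) : Option (List Int) :=
  let st := loopB frames current_frame (none, none)
  if pvFalsyB st.1 || pvFalsyB st.2 then none
  else
    -- after the guard both components are non-None; `return [frame_start, frame_end]` under Option typing
    st.1.bind (fun a => st.2.bind (fun b => some [a, b]))

-- ===== PRECONDITION & SPEC =====
def Spec_find_sandwiching_frames (frames : List Int) (current_frame : Int) (out : Option (List Int)) : Prop := out = find_sandwiching_frames_alt frames current_frame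
instance (frames : List Int) (current_frame : Int) (out : Option (List Int)) : Decidable (Spec_find_sandwiching_frames frames current_frame out) := by unfold Spec_find_sandwiching_frames; infer_instance

-- ===== CLAIM (what is proved, stated in full; the proofs are below) =====
def Claim_equal_find_sandwiching_frames : Prop := ∀ (frames : List Int) (current_frame : Int), Dom_find_sandwiching_frames frames current_frame → Spec_find_sandwiching_frames frames current_frame (find_sandwiching_frames frames current_frame)

-- ===== LEMMAS AND PROOFS =====

-- "first some wins" combinator, used only in the proofs
def por (a b : Option Int) : Option Int :=
  match a with
  | some x => some x
  | none => b

theorem loopStartA_append (xs ys : List Int) (c : Int) :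
    loopStartA (xs ++ ys) c = por (loopStartA xs c) (loopStartA ys c) := by
  induction xs with
  | nil => rfl
  | cons f rest ih =>
      simp only [List.cons_append, loopStartA]
      split_ifs <;> simp [por, ih]

theorem loopB_eq (l : List Int) (c : Int) (s e : Option Int) :
    loopB l c (s, e) = (por (loopStartA l.reverse c) s, por e (loopEndA l c)) := by
  induction l generalizing s e with
  | nil => cases e <;> simp [loopB, loopStartA, loopEndA, por]
  | cons f rest ih =>
      simp only [loopB, List.reverse_cons, loopStartA_append]
      by_cases h1 : f < c
      · have h2 : ¬ f > c := by omega
        simp [h1, h2, ih, loopStartA, loopEndA, por]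
        cases loopStartA rest.reverse c <;> simp
      · by_cases h2 : f > c
        · cases e with
          | none =>
              simp [h1, h2, ih, loopStartA, loopEndA, por]
              cases loopStartA rest.reverse c <;> simp [por]
          | some x =>
              simp [h1, h2, ih, loopStartA, por]
              cases loopStartA rest.reverse c <;> simp
        · have hc : f = c := by omega
          simp [ih, loopStartA, loopEndA, por, hc]
          cases loopStartA rest.reverse c <;> simp

-- ===== VERDICT (by name: the statement is the Claim_ definition above) =====
theorem find_sandwiching_frames_spec : Claim_equal_find_sandwiching_frames := by
  intro frames current_frame _
  unfold Spec_find_sandwiching_frames find_sandwiching_frames find_sandwiching_frames_alt pvFalsy pvFalsyB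
  rw [loopB_eq]
  cases loopStartA frames.reverse current_frame <;>
    cases loopEndA frames current_frame <;>
      simp [por, pvFalsy, pvFalsyB]
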